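-- pv_equiv track=rewrite | github.com/KubakCz/AoC2020 | 16/ticke_translation.py | can_be
-- ===== SOURCE A (Python) =====
-- from typing import Dict, Tuple, List, Set
--
-- Rules = Dict[str, Tuple[int, int, int, int]]
--
-- Ticket = List[int]
--
-- def can_be(position: int, tickets: List[Ticket], rules: Rules) -> Set[str]:
--     result = set()
--     for rule, (f1, t1, f2, t2) in rules.items():
--         can = True
--         for ticket in tickets:
--             if not (f1 <= ticket[position] <= t1 or f2 <= ticket[position] <= t2):
--                 can = False
--                 break
--         if can:
--             result.add(rule)
--     return result
-- ===== SOURCE B (Python) =====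
-- def can_be(position, tickets, rules):
--     # Thread a shrinking survivor set through one pass over the tickets:
--     # start from all rules, keep only those whose ranges admit ticket[position].
--     candidates = list(rules.items())
--     for ticket in tickets:
--         v = ticket[position]
--         candidates = [(name, b) for (name, b) in candidates
--                       if b[0] <= v <= b[1] or b[2] <= v <= b[3]]
--     return {name for name, _ in candidates}
-- ===== Notes on version B (the rewrite author's own statement) =====
-- stated objective: alternative
-- what changed: Instead of validating each rule against all tickets with an inner early-exit loop, B threads a shrinking candidate set of rules through a single outer pass over the tickets, filtering survivors by each ticket's value at the position.
-- outside the precondition, e.g. on can_be(0, [[5], []], {'r': (0, 0, 0, 0)}): A returns set(), B raises IndexError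
import Mathlib
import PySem

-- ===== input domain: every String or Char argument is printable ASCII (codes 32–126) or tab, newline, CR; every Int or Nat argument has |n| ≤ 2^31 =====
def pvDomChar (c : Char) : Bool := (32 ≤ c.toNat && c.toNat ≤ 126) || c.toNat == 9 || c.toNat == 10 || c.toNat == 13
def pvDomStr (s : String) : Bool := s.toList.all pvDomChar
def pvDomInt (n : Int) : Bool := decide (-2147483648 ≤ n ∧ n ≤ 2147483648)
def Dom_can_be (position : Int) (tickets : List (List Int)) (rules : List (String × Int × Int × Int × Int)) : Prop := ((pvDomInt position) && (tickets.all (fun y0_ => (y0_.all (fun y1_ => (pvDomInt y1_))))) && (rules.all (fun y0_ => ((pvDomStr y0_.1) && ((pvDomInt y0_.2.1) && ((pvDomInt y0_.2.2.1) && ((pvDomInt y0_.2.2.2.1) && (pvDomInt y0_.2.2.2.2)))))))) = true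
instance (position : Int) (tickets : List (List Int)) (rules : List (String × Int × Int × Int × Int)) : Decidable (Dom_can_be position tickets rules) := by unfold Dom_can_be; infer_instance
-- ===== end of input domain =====

-- B replaces A's per-rule validation loop by a shrinking candidate set threaded
-- through one pass over the tickets (alternative decomposition, same cost).


-- ===== PORT A =====
-- inner 'for ticket in tickets: … break' loop of A: returns the final value of 'can'
def canLoop (position : Int) (f1 t1 f2 t2 : Int) : List (List Int) → Bool
  | [] => true
  | ticket :: rest =>
    let v := PySem.List.pyGetD ticket position 0   -- ticket[position]; total under Pre_
    if (f1 ≤ v ∧ v ≤ t1) ∨ (f2 ≤ v ∧ v ≤ t2) then canLoop position f1 t1 f2 t2 rest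
    else false  -- can = False; break

def can_be (position : Int) (tickets : List (List Int)) (rules : List (String × Int × Int × Int × Int)) : List String :=
  rules.foldl (fun result r =>
    match r with
    | (rule, f1, t1, f2, t2) =>
      if canLoop position f1 t1 f2 t2 tickets then PySem.Set.add result rule else result)
    PySem.Set.empty

-- ===== PORT B =====
def can_be_alt (position : Int) (tickets : List (List Int)) (rules : List (String × Int × Int × Int × Int)) : List String :=
  let candidates := tickets.foldl (fun cands ticket =>
    let v := PySem.List.pyGetD ticket position 0   -- ticket[position]; total under Pre_
    cands.filter (fun r =>
      decide ((r.2.1 ≤ v ∧ v ≤ r.2.2.1) ∨ (r.2.2.2.1 ≤ v ∧ v ≤ r.2.2.2.2)))) rules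
  PySem.Set.ofList (candidates.map Prod.fst)

-- ===== PRECONDITION & SPEC =====
-- Pre_ excludes (a) inputs where some ticket has no valid entry at 'position' (A raises
-- IndexError on almost all of them, though it can still return when every rule's inner loop
-- breaks before the bad ticket — there B naturally raises), and (b) rule lists with duplicate
-- rule names, which a Python dict cannot represent.
def Pre_can_be (position : Int) (tickets : List (List Int)) (rules : List (String × Int × Int × Int × Int)) : Prop :=
  (∀ t ∈ tickets, PySem.Raise.InRange t.length position) ∧ (rules.map Prod.fst).Nodup
instance (position : Int) (tickets : List (List Int)) (rules : List (String × Int × Int × Int × Int)) : Decidable (Pre_can_be position tickets rules) := by unfold Pre_can_be; infer_instance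

def pvWitness_can_be : Int × List (List Int) × (List (String × Int × Int × Int × Int)) :=
  (0, [[3], [8]], [("a", 1, 5, 7, 9), ("b", 7, 8, 9, 9)])

def Spec_can_be (position : Int) (tickets : List (List Int)) (rules : List (String × Int × Int × Int × Int)) (out : List String) : Prop := out = can_be_alt position tickets rules
instance (position : Int) (tickets : List (List Int)) (rules : List (String × Int × Int × Int × Int)) (out : List String) : Decidable (Spec_can_be position tickets rules out) := by unfold Spec_can_be; infer_instance

-- ===== CLAIM (what is proved, stated in full; the proofs are below) =====
def Claim_equal_can_be : Prop := ∀ (position : Int) (tickets : List (List Int)) (rules : List (String × Int × Int × Int × Int)), Dom_can_be position tickets rules → Pre_can_be position tickets rules → Spec_can_be position tickets rules (can_be position tickets rules)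

-- ===== LEMMAS AND PROOFS =====

-- the per-rule predicate both sides decide
def rulePred (position : Int) (f1 t1 f2 t2 : Int) (ticket : List Int) : Bool :=
  let v := PySem.List.pyGetD ticket position 0
  decide ((f1 ≤ v ∧ v ≤ t1) ∨ (f2 ≤ v ∧ v ≤ t2))

theorem canLoop_eq_all (position f1 t1 f2 t2 : Int) (tickets : List (List Int)) :
    canLoop position f1 t1 f2 t2 tickets = tickets.all (rulePred position f1 t1 f2 t2) := by
  induction tickets with
  | nil => rfl
  | cons t rest ih =>
    simp only [canLoop, List.all_cons, rulePred]
    split_ifs with h <;> simp [h, ih]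

theorem filter_fold_eq (position : Int) (tickets : List (List Int)) :
    ∀ cands : List (String × Int × Int × Int × Int),
      tickets.foldl (fun cands ticket =>
        let v := PySem.List.pyGetD ticket position 0
        cands.filter (fun r =>
          decide ((r.2.1 ≤ v ∧ v ≤ r.2.2.1) ∨ (r.2.2.2.1 ≤ v ∧ v ≤ r.2.2.2.2)))) cands
      = cands.filter (fun r => tickets.all (rulePred position r.2.1 r.2.2.1 r.2.2.2.1 r.2.2.2.2)) := by
  induction tickets with
  | nil => intro cands; simp
  | cons t rest ih =>
    intro cands
    simp only [List.foldl_cons, ih, List.filter_filter]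
    congr 1
    funext r
    simp [rulePred, Bool.and_comm]

theorem A_fold_eq (position : Int) (tickets : List (List Int)) :
    ∀ (rules : List (String × Int × Int × Int × Int)) (acc : List String),
      (acc ++ rules.map Prod.fst).Nodup →
      rules.foldl (fun result r =>
        match r with
        | (rule, f1, t1, f2, t2) =>
          if canLoop position f1 t1 f2 t2 tickets then PySem.Set.add result rule else result) acc
      = acc ++ (rules.filter (fun r => canLoop position r.2.1 r.2.2.1 r.2.2.2.1 r.2.2.2.2 tickets)).map Prod.fst := by
  intro rules
  induction rules with
  | nil => intro acc _; simp
  | cons r rs ih =>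
    intro acc hnd
    obtain ⟨rule, f1, t1, f2, t2⟩ := r
    have hnotin : rule ∉ acc := by
      have h2 : (acc ++ rule :: rs.map Prod.fst).Nodup := hnd
      intro hmem
      have hd := (List.nodup_append.mp h2).2.2
      exact hd rule hmem rule (List.mem_cons_self ..) rfl
    simp only [List.foldl_cons, List.filter_cons]
    by_cases hc : canLoop position f1 t1 f2 t2 tickets
    · have hadd : PySem.Set.add acc rule = acc ++ [rule] := PySem.Set.add_of_not_mem hnotin
      have hnd' : ((acc ++ [rule]) ++ rs.map Prod.fst).Nodup := by
        rw [List.append_assoc]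
        exact hnd
      simp only [hc, if_true, hadd]
      exact (ih _ hnd').trans (by simp)
    · have hnd' : (acc ++ rs.map Prod.fst).Nodup := by
        refine List.Nodup.sublist ?_ hnd
        exact List.Sublist.append (List.Sublist.refl _) (by simp)
      simp only [hc]
      exact (ih _ hnd').trans (by simp)

-- ===== VERDICT (by name: the statement is the Claim_ definition above) =====
theorem can_be_spec : Claim_equal_can_be := by
  intro position tickets rules _ hpre
  obtain ⟨hidx, hnd⟩ := hpre
  show can_be position tickets rules = can_be_alt position tickets rules
  unfold can_be can_be_alt
  rw [filter_fold_eq]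
  rw [A_fold_eq position tickets rules PySem.Set.empty (by simpa [PySem.Set.empty] using hnd)]
  have hfe : (rules.filter (fun r => canLoop position r.2.1 r.2.2.1 r.2.2.2.1 r.2.2.2.2 tickets))
      = rules.filter (fun r => tickets.all (rulePred position r.2.1 r.2.2.1 r.2.2.2.1 r.2.2.2.2)) := by
    simp [canLoop_eq_all]
  have hndf : ((rules.filter (fun r => tickets.all (rulePred position r.2.1 r.2.2.1 r.2.2.2.1 r.2.2.2.2))).map Prod.fst).Nodup :=
    List.Nodup.sublist (List.Sublist.map Prod.fst List.filter_sublist) hnd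
  simp only [hfe, PySem.Set.empty, List.nil_append]
  exact (PySem.Set.ofList_eq_self_of_nodup _ hndf).symm
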